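-- pv_equiv track=rewrite | github.com/EdgarYepez/MatchingHub | src/matching_hub/stable_marriage_helper.py | check_has_ties
-- ===== SOURCE A (Python) =====
-- def check_has_ties(pref):
-- 	"""
-- 	Checks whether the preference list contains ties.
-- 	"""
-- 	def __has_ties(lists):
-- 		for l in lists:
-- 			scores = { }
-- 			for m in l:
-- 				if not m[1] in scores:
-- 					scores[m[1]] = set()
-- 				scores[m[1]].add(m[0])
-- 				if len(scores[m[1]]) > 1:
-- 					return True
-- 		return False
-- 	return __has_ties(list(pref.values()))
-- ===== SOURCE B (Python) =====
-- def check_has_ties(pref):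
-- 	"""
-- 	Checks whether the preference list contains ties.
-- 	"""
-- 	for l in pref.values():
-- 		pairs = set(l)
-- 		scores = [p[1] for p in pairs]
-- 		if len(set(scores)) != len(scores):
-- 			return True
-- 	return False
-- ===== Notes on version B (the rewrite author's own statement) =====
-- stated objective: simpler
-- what changed: Replaces the incremental dict-of-score-to-partner-sets with in-loop early exit by a two-phase pass per list: dedupe whole (partner, score) pairs with set(l), then report a tie iff the distinct-score count differs from the pair count.
import Mathlib
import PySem

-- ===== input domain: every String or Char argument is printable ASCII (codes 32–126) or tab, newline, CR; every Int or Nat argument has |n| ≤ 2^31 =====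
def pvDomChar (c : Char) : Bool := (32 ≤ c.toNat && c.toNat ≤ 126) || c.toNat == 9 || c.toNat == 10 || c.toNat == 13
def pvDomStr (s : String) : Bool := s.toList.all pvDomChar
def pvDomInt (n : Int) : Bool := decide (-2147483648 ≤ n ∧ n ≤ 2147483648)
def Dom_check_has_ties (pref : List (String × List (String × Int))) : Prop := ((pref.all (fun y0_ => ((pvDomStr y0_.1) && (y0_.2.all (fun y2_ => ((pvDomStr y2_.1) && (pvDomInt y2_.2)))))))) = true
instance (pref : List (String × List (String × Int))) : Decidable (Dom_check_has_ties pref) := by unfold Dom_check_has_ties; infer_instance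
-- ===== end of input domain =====

-- B replaces A's incremental dict-of-score→partner-sets (early exit inside the loop) by a
-- two-phase pass per list: dedupe the whole (partner, score) pairs, then compare the
-- distinct-score count with the pair count. Objective: simpler. Return value only; no mutation.


-- ===== PORT A =====
-- one iteration of the inner 'for m in l' loop of __has_ties, returning the updated 'scores' dict
def pvAStep (scores : PySem.Dict Int (PySem.Set String)) (m : String × Int) :
    PySem.Dict Int (PySem.Set String) :=
  -- if not m[1] in scores: scores[m[1]] = set()
  let scores := if !(scores.contains m.2) then scores.insert m.2 PySem.Set.empty else scores
  -- scores[m[1]].add(m[0])  (in-place set mutation = re-insert the grown set)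
  scores.insert m.2 (PySem.Set.add (scores.getD m.2 PySem.Set.empty) m.1)

-- the inner loop with its early 'return True'
def pvAInner : PySem.Dict Int (PySem.Set String) → List (String × Int) → Bool
  | _, [] => false
  | scores, m :: rest =>
    let scores' := pvAStep scores m
    -- if len(scores[m[1]]) > 1: return True
    if 1 < (scores'.getD m.2 PySem.Set.empty).length then true
    else pvAInner scores' rest

-- the outer 'for l in lists' loop of __has_ties
def pvAOuter : List (String × List (String × Int)) → Bool
  | [] => false
  | kl :: rest => if pvAInner PySem.Dict.empty kl.2 then true else pvAOuter rest

def check_has_ties (pref : List (String × List (String × Int))) : Bool :=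
  pvAOuter pref

-- ===== PORT B =====
-- per-list test: dedupe whole pairs, then a repeated score among distinct pairs is a tie
def pvTieList (l : List (String × Int)) : Bool :=
  let pairs : PySem.Set (String × Int) := PySem.Set.ofList l
  let scores : List Int := pairs.map (fun p => p.2)
  decide ((PySem.Set.ofList scores).length ≠ scores.length)

def check_has_ties_alt (pref : List (String × List (String × Int))) : Bool :=
  pref.any (fun kl => pvTieList kl.2)

-- ===== PRECONDITION & SPEC =====
def Spec_check_has_ties (pref : List (String × List (String × Int))) (out : Bool) : Prop := out = check_has_ties_alt pref
instance (pref : List (String × List (String × Int))) (out : Bool) : Decidable (Spec_check_has_ties pref out) := by unfold Spec_check_has_ties; infer_instance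

-- ===== CLAIM (what is proved, stated in full; the proofs are below) =====
def Claim_equal_check_has_ties : Prop := ∀ (pref : List (String × List (String × Int))), Dom_check_has_ties pref → Spec_check_has_ties pref (check_has_ties pref)


-- ===== LEMMAS AND PROOFS =====

-- the tie property a single list may have
def pvTie (l : List (String × Int)) : Prop :=
  ∃ p ∈ l, ∃ q ∈ l, p.2 = q.2 ∧ p.1 ≠ q.1

-- the 'scores' dict after processing 'seen'
def pvDOf (seen : List (String × Int)) : PySem.Dict Int (PySem.Set String) :=
  seen.foldl pvAStep PySem.Dict.empty

theorem pvGetD_pvAStep (d : PySem.Dict Int (PySem.Set String)) (m : String × Int) (s : Int) :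
    (pvAStep d m).getD s PySem.Set.empty =
      if s = m.2 then PySem.Set.add (d.getD m.2 PySem.Set.empty) m.1
      else d.getD s PySem.Set.empty := by
  unfold pvAStep
  by_cases hc : d.contains m.2 = true
  · simp [hc, PySem.Dict.getD_insert]
  · have hc' : d.contains m.2 = false := by simpa using hc
    have he : d.getD m.2 ([] : PySem.Set String) = [] :=
      PySem.Dict.getD_of_not_contains d ([] : PySem.Set String) hc'
    simp [hc', PySem.Dict.getD_insert, PySem.Set.add, PySem.Set.empty, he]
    split_ifs <;> rfl

theorem pvMem_foldl (seen : List (String × Int)) : ∀ (d : PySem.Dict Int (PySem.Set String))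
    (x : String) (s : Int),
    x ∈ (seen.foldl pvAStep d).getD s PySem.Set.empty ↔
      x ∈ d.getD s PySem.Set.empty ∨ (x, s) ∈ seen := by
  induction seen with
  | nil => simp
  | cons m rest ih =>
    intro d x s
    simp only [List.foldl_cons, ih, pvGetD_pvAStep, List.mem_cons]
    by_cases hs : s = m.2
    · subst hs
      simp [PySem.Set.mem_add, Prod.ext_iff]
      tauto
    · simp [hs, Prod.ext_iff]

theorem pvNodup_foldl (seen : List (String × Int)) : ∀ (d : PySem.Dict Int (PySem.Set String)),
    (∀ s, (d.getD s PySem.Set.empty).Nodup) → ∀ (s : Int),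
    ((seen.foldl pvAStep d).getD s PySem.Set.empty).Nodup := by
  induction seen with
  | nil => intro d h s; exact h s
  | cons m rest ih =>
    intro d h s
    refine ih _ (fun t => ?_) s
    rw [pvGetD_pvAStep]
    split_ifs with ht
    · exact PySem.Set.nodup_add _ _ (h m.2)
    · exact h t

theorem pvLen_le_one {α : Type} (b : List α) (hnd : b.Nodup)
    (h : ∀ x ∈ b, ∀ y ∈ b, x = y) : b.length ≤ 1 := by
  match b with
  | [] => simp
  | [x] => simp
  | x :: y :: t =>
    have hxy := h x (by simp) y (by simp)
    subst hxy
    simp at hnd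

theorem pvAInner_iff (l : List (String × Int)) : ∀ (seen : List (String × Int)),
    (∀ p ∈ seen, ∀ q ∈ seen, p.2 = q.2 → p.1 = q.1) →
    (pvAInner (pvDOf seen) l = true ↔
      ∃ p ∈ seen ++ l, ∃ q ∈ seen ++ l, p.2 = q.2 ∧ p.1 ≠ q.1) := by
  induction l with
  | nil =>
    intro seen hno
    simp only [pvAInner, List.append_nil]
    constructor
    · intro h; exact absurd h (by simp)
    · rintro ⟨p, hp, q, hq, h2, h1⟩
      exact absurd (hno p hp q hq h2) h1
  | cons m rest ih =>
    intro seen hno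
    have hmem : ∀ x, x ∈ (pvDOf seen).getD m.2 PySem.Set.empty ↔ (x, m.2) ∈ seen := by
      intro x; unfold pvDOf
      rw [pvMem_foldl]; simp [PySem.Dict.getD_empty]
    have hnd : ((pvDOf seen).getD m.2 PySem.Set.empty).Nodup :=
      pvNodup_foldl seen _ (by simp [PySem.Dict.getD_empty]) m.2
    have hle : ((pvDOf seen).getD m.2 PySem.Set.empty).length ≤ 1 :=
      pvLen_le_one _ hnd (by
        intro x hx y hy
        exact hno (x, m.2) ((hmem x).1 hx) (y, m.2) ((hmem y).1 hy) rfl)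
    set base := (pvDOf seen).getD m.2 PySem.Set.empty with hbase
    have hstep : pvAInner (pvDOf seen) (m :: rest) =
        if 1 < (PySem.Set.add base m.1).length then true
        else pvAInner (pvDOf (seen ++ [m])) rest := by
      show (if 1 < ((pvAStep (pvDOf seen) m).getD m.2 PySem.Set.empty).length then true
            else pvAInner (pvAStep (pvDOf seen) m) rest) = _
      rw [pvGetD_pvAStep]
      rw [hbase]
      simp [pvDOf, List.foldl_append]
    have hcond : (1 < (PySem.Set.add base m.1).length) ↔ ∃ x, (x, m.2) ∈ seen ∧ x ≠ m.1 := by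
      by_cases hm : m.1 ∈ base
      · rw [PySem.Set.add_of_mem hm]
        constructor
        · intro h; omega
        · rintro ⟨x, hx, hne⟩
          exact absurd (hno (x, m.2) hx (m.1, m.2) ((hmem m.1).1 hm) rfl) hne
      · rw [PySem.Set.add_of_not_mem hm]
        rw [List.length_append]
        constructor
        · intro h
          have hne : base ≠ [] := by
            intro hb; rw [hb] at h; simp at h
          obtain ⟨x, hx⟩ := List.exists_mem_of_ne_nil base hne
          exact ⟨x, (hmem x).1 hx, fun he => hm (he ▸ hx)⟩
        · rintro ⟨x, hx, hne⟩
          have hxb : x ∈ base := (hmem x).2 hx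
          have := List.length_pos_of_mem hxb
          simp
          omega
    rw [hstep]
    by_cases hc : ∃ x, (x, m.2) ∈ seen ∧ x ≠ m.1
    · rw [if_pos (hcond.2 hc)]
      obtain ⟨x, hx, hne⟩ := hc
      simp only [true_iff]
      exact ⟨(x, m.2), by simp [hx], m, by simp, rfl, hne⟩
    · rw [if_neg (fun h => hc (hcond.1 h))]
      have hno' : ∀ p ∈ seen ++ [m], ∀ q ∈ seen ++ [m], p.2 = q.2 → p.1 = q.1 := by
        intro p hp q hq h2
        simp only [List.mem_append, List.mem_singleton] at hp hq
        rcases hp with hp | hp <;> rcases hq with hq | hq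
        · exact hno p hp q hq h2
        · subst hq
          by_contra hne
          exact hc ⟨p.1, h2 ▸ hp, hne⟩
        · subst hp
          by_contra hne
          exact hc ⟨q.1, h2 ▸ hq, fun he => hne he.symm⟩
        · subst hp; subst hq; rfl
      rw [ih (seen ++ [m]) hno']
      simp [List.append_assoc]

theorem pvLen_ofList_eq_iff {α : Type} [BEq α] [LawfulBEq α] (xs : List α) :
    (PySem.Set.ofList xs).length = xs.length ↔ xs.Nodup := by
  induction xs using List.reverseRecOn with
  | nil => simp [PySem.Set.ofList]
  | append_singleton xs x ih =>
    rw [PySem.Set.ofList_append_singleton, PySem.Set.add_eq_ite]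
    by_cases hx : x ∈ PySem.Set.ofList xs
    · have hx' : x ∈ xs := (PySem.Set.mem_ofList _ _).1 hx
      have hlt := PySem.Set.length_ofList_le xs
      simp [hx, List.nodup_append]
      constructor
      · intro h; omega
      · rintro ⟨-, hall⟩; exact absurd rfl (hall x hx')
    · have hx' : x ∉ xs := fun h => hx ((PySem.Set.mem_ofList _ _).2 h)
      simp [hx, List.nodup_append, ih]
      intro _ a ha he
      exact hx' (he ▸ ha)

theorem pvTieList_iff (l : List (String × Int)) : pvTieList l = true ↔ pvTie l := by
  unfold pvTieList
  simp only [decide_eq_true_eq]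
  rw [Ne, pvLen_ofList_eq_iff]
  constructor
  · intro h
    -- not nodup map → two distinct pairs with same score
    by_contra hno
    apply h
    refine (PySem.Set.nodup_ofList l).map_on ?_
    intro p hp q hq hpq
    by_contra hne
    exact hno ⟨p, (PySem.Set.mem_ofList _ _).1 hp, q, (PySem.Set.mem_ofList _ _).1 hq, hpq, fun h1 => hne (Prod.ext h1 hpq)⟩
  · rintro ⟨p, hp, q, hq, h2, h1⟩ hnd
    have hinj := List.inj_on_of_nodup_map hnd
    have := hinj ((PySem.Set.mem_ofList _ _).2 hp) ((PySem.Set.mem_ofList _ _).2 hq) h2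
    exact h1 (congrArg Prod.fst this)

theorem pvAInner_empty_iff (l : List (String × Int)) :
    pvAInner PySem.Dict.empty l = true ↔ pvTie l := by
  have h := pvAInner_iff l [] (by simp)
  simpa [pvDOf, pvTie] using h

theorem pvOuter_eq (pref : List (String × List (String × Int))) :
    pvAOuter pref = check_has_ties_alt pref := by
  induction pref with
  | nil => rfl
  | cons kl rest ih =>
    have h : pvAInner PySem.Dict.empty kl.2 = pvTieList kl.2 :=
      Bool.eq_iff_iff.mpr ((pvAInner_empty_iff kl.2).trans (pvTieList_iff kl.2).symm)
    show (if pvAInner PySem.Dict.empty kl.2 then true else pvAOuter rest) = _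
    rw [h, ih]
    cases h2 : pvTieList kl.2 <;> simp [check_has_ties_alt, h2]

-- ===== VERDICT (by name: the statement is the Claim_ definition above) =====
theorem check_has_ties_spec : Claim_equal_check_has_ties := by
  intro pref _
  exact pvOuter_eq pref
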